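-- pv_equiv track=rewrite | github.com/KarmaNastigla/IT | test 5.py | search
-- ===== SOURCE A (Python) =====
-- def search(search_queries):
--     row = {}
--     for i in search_queries:
--         length = len(i.split())
--         if length in row:
--             row[length] += 1
--         else:
--             row[length] = 1
--     total_q = len(search_queries)
--     res = {key: round(val/total_q * 100) for key, val in row.items()}
--     return res
-- ===== SOURCE B (Python) =====
-- def search(search_queries):
--     # Different algorithm: recursive partition grouping (quicksort-partition style)
--     # instead of a hash tally: peel off the first word-count, filter out all its
--     # occurrences, recurse on the remainder; percentage computed per group.
--     total_q = len(search_queries)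
--
--     def tally(lengths):
--         if not lengths:
--             return {}
--         first = lengths[0]
--         rest = [x for x in lengths[1:] if x != first]
--         count = len(lengths) - len(rest)
--         res = {first: round(count / total_q * 100)}
--         res.update(tally(rest))
--         return res
--
--     return tally([len(q.split()) for q in search_queries])
-- ===== Notes on version B (the rewrite author's own statement) =====
-- stated objective: alternative
-- what changed: Replaces A's incremental hash tally over a dict by a recursive partition grouping: peel off the first word-count, filter out all of its occurrences, obtain its frequency as the length difference, and recurse on the remainder; the percentage is computed per group as each key is peeled.
import Mathlib
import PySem

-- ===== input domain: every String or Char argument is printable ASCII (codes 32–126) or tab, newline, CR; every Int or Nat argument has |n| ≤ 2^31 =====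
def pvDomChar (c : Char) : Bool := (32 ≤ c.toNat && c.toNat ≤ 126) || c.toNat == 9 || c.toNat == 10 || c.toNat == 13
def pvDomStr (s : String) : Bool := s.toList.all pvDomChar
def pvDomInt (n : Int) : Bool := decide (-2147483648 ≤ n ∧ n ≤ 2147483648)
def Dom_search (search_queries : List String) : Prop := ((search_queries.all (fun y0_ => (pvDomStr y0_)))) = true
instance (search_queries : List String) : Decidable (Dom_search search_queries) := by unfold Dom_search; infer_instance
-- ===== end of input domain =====

-- B replaces A's hash tally by a recursive partition grouping (peel first word-count, filter, recurse); objective: alternative decomposition, same result.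

-- ===== PORT A =====
-- pvRne n d: round-half-even of n/d to the nearest integer (d > 0).
def pvRne (n d : Int) : Int :=
  let q := PySem.Int.floordiv n d
  let r := n - q * d
  if 2 * r < d then q
  else if d < 2 * r then q + 1
  else if PySem.Int.mod q 2 = 0 then q else q + 1

-- Hand port of Python's round(v / t * 100) on ints (PySem has no float primitive):
-- models the two IEEE-754 double roundings (v/t to 53 bits, then *100 to 53 bits)
-- followed by round-half-even to an integer; exact for 0 <= v <= t (the only use here).
def pvRoundPct (v t : Int) : Int :=
  if v ≤ 0 then 0
  else
    let e1 : Nat := 52 + PySem.Int.bitLength t - PySem.Int.bitLength v + 1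
    let e : Nat := if 2 ^ 52 * t ≤ v * 2 ^ (e1 - 1) then e1 - 1 else e1
    let m := pvRne (v * 2 ^ e) t
    let me : Int × Nat := if m = 2 ^ 53 then (2 ^ 52, e - 1) else (m, e)
    let x := me.1 * 100
    let j : Nat := PySem.Int.bitLength x - 53
    let m2 := pvRne x (2 ^ j)
    pvRne m2 (2 ^ (me.2 - j))

def search (search_queries : List String) : List (Int × Int) :=
  let row := search_queries.foldl
    (fun (row : PySem.Dict Int Int) i =>
      let length : Int := (PySem.Str.split₀ i).length
      match row.get? length with
      | some v => row.insert length (v + 1)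
      | none => row.insert length 1)
    PySem.Dict.empty
  let total_q : Int := search_queries.length
  let res := row.items.foldl
    (fun (res : PySem.Dict Int Int) kv => res.insert kv.1 (pvRoundPct kv.2 total_q))
    PySem.Dict.empty
  res.items

-- ===== PORT B =====
-- tally: peel off the first word-count, drop all its occurrences, recurse.
def pvTally (total_q : Int) : List Int → PySem.Dict Int Int
  | [] => PySem.Dict.empty
  | first :: tl =>
    let rest := tl.filter (fun x => x != first)
    let count : Int := ((first :: tl).length : Int) - (rest.length : Int)
    let res := PySem.Dict.empty.insert first (pvRoundPct count total_q)
    res.update (pvTally total_q rest).items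
termination_by ls => ls.length
decreasing_by
  have := List.length_filter_le (fun x => x != first) tl
  simp
  omega

def search_alt (search_queries : List String) : List (Int × Int) :=
  let total_q : Int := search_queries.length
  (pvTally total_q (search_queries.map (fun q => ((PySem.Str.split₀ q).length : Int)))).items

-- ===== PRECONDITION & SPEC =====
def Spec_search (search_queries : List String) (out : List (Int × Int)) : Prop := out = search_alt search_queries
instance (search_queries : List String) (out : List (Int × Int)) : Decidable (Spec_search search_queries out) := by unfold Spec_search; infer_instance

-- ===== CLAIM (what is proved, stated in full; the proofs are below) =====
def Claim_equal_search : Prop := ∀ (search_queries : List String), Dom_search search_queries → Spec_search search_queries (search search_queries)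

-- ===== LEMMAS AND PROOFS =====

theorem pv_lenfil (l : List Int) (x : Int) :
    (l.filter (fun y => y != x)).length + l.count x = l.length := by
  have := List.length_eq_countP_add_countP (l := l) (p := fun y => y != x)
  have h2 : List.countP (fun a => decide ¬(a != x) = true) l = l.count x := by
    apply List.countP_congr; intro a _; simp [bne]
  have h3 := (List.countP_eq_length_filter (p := fun y => y != x) (l := l)).symm
  omega

theorem pv_cntfil (l : List Int) (x k : Int) (h : k ≠ x) :
    (l.filter (fun y => y != x)).count k = l.count k := by
  rw [List.count_filter]; simp [h]

theorem pv_foldl_add_filter (x : Int) (l : List Int) : ∀ s : List Int, x ∈ s →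
    List.foldl PySem.Set.add s l = List.foldl PySem.Set.add s (l.filter (fun y => y != x)) := by
  induction l with
  | nil => intro s _; rfl
  | cons y tl ih =>
    intro s hs
    by_cases hy : y = x
    · subst hy
      have : PySem.Set.add s y = s := by simp [PySem.Set.add, PySem.Set.contains, hs]
      simp [this, ih s hs]
    · have hx : x ∈ PySem.Set.add s y := by
        simp [PySem.Set.add]; split <;> simp [hs]
      simp [hy, ih _ hx]

theorem pv_foldl_add_cons (x : Int) (l : List Int) : ∀ s : List Int, (∀ y ∈ l, y ≠ x) →
    List.foldl PySem.Set.add (x :: s) l = x :: List.foldl PySem.Set.add s l := by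
  induction l with
  | nil => intro s _; rfl
  | cons y tl ih =>
    intro s h
    have hy : y ≠ x := h y (by simp)
    have : PySem.Set.add (x :: s) y = x :: PySem.Set.add s y := by
      simp [PySem.Set.add, PySem.Set.contains, hy]
      split <;> simp
    simp only [List.foldl_cons, this]
    exact ih _ (fun z hz => h z (by simp [hz]))

-- ordered dedup peels its head: set(x::l) = x :: set(l with x removed)
theorem pv_ofList_cons_filter (x : Int) (l : List Int) :
    PySem.Set.ofList (x :: l) = x :: PySem.Set.ofList (l.filter (fun y => y != x)) := by
  have h1 : PySem.Set.ofList (x :: l) = List.foldl PySem.Set.add [x] l := by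
    simp [PySem.Set.ofList_eq_foldl, PySem.Set.add]
  rw [h1, pv_foldl_add_filter x l [x] (by simp)]
  rw [pv_foldl_add_cons x _ [] (by intro y hy; simpa using (List.of_mem_filter hy))]
  simp [PySem.Set.ofList_eq_foldl]

-- B's recursion computes exactly Counter-items with percentages applied.
theorem pv_tally_items (t : Int) : ∀ n (ls : List Int), ls.length ≤ n →
    (pvTally t ls).items
      = (PySem.Set.ofList ls).map (fun k => (k, pvRoundPct ((ls.count k : Nat) : Int) t)) := by
  intro n
  induction n with
  | zero =>
    intro ls h
    have : ls = [] := List.eq_nil_of_length_eq_zero (Nat.le_zero.mp h)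
    subst this
    rw [pvTally]
    rfl
  | succ n ih =>
    intro ls h
    match ls with
    | [] =>
      rw [pvTally]
      rfl
    | x :: tl =>
      rw [pvTally]
      have hrl := List.length_filter_le (fun y => y != x) tl
      have hrest := ih (tl.filter (fun y => y != x)) (by simp at h; omega)
      have hcnt : ((x :: tl).length : Int) - ((tl.filter (fun y => y != x)).length : Int)
          = (((x :: tl).count x : Nat) : Int) := by
        have := pv_lenfil tl x
        simp [List.count_cons_self]
        omega
      simp only [PySem.Dict.update, hrest]
      have h1 : ∀ a ∈ (PySem.Set.ofList (tl.filter (fun y => y != x))).map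
            (fun k => (k, pvRoundPct (((tl.filter (fun y => y != x)).count k : Nat) : Int) t)),
          (PySem.Dict.empty.insert x (pvRoundPct (((x :: tl).length : Int) - ((tl.filter (fun y => y != x)).length : Int)) t)).contains a.1 = false := by
        intro a ha
        obtain ⟨k, hkmem, rfl⟩ := List.mem_map.mp ha
        have hkne : k ≠ x := by
          have := List.of_mem_filter ((PySem.Set.mem_ofList _ _).mp hkmem)
          simpa using this
        rw [PySem.Dict.contains_insert]
        simp [hkne, PySem.Dict.contains_empty]
      have h2 : (((PySem.Set.ofList (tl.filter (fun y => y != x))).map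
            (fun k => (k, pvRoundPct (((tl.filter (fun y => y != x)).count k : Nat) : Int) t))).map Prod.fst).Nodup := by
        simp only [List.map_map]
        simp [Function.comp_def]
      have hfresh := PySem.Dict.items_foldl_insert_fresh
        ((PySem.Set.ofList (tl.filter (fun y => y != x))).map
            (fun k => (k, pvRoundPct (((tl.filter (fun y => y != x)).count k : Nat) : Int) t)))
        Prod.fst Prod.snd
        (PySem.Dict.empty.insert x (pvRoundPct (((x :: tl).length : Int) - ((tl.filter (fun y => y != x)).length : Int)) t))
        h1 h2
      rw [hfresh]
      rw [PySem.Dict.items_insert_of_not_contains _ _ (PySem.Dict.contains_empty _)]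
      rw [pv_ofList_cons_filter, hcnt]
      simp only [List.map_cons, List.map_map]
      rw [show (PySem.Dict.empty : PySem.Dict Int Int).items = [] from rfl]
      simp only [List.nil_append, List.singleton_append]
      congr 1
      apply List.map_congr_left
      intro k hk
      have hkne : k ≠ x := by
        have := List.of_mem_filter ((PySem.Set.mem_ofList _ _).mp hk)
        simpa using this
      simp only [Function.comp_def]
      rw [pv_cntfil tl x k hkne]
      have : (x :: tl).count k = tl.count k := by
        rw [List.count_cons]; simp [Ne.symm hkne]
      rw [this]

-- A's tally loop over the queries is Counter(lengths).
theorem pv_rowA_eq_counter (qs : List String) :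
    qs.foldl
      (fun (row : PySem.Dict Int Int) i =>
        let length : Int := (PySem.Str.split₀ i).length
        match row.get? length with
        | some v => row.insert length (v + 1)
        | none => row.insert length 1)
      PySem.Dict.empty
    = PySem.Dict.counter (qs.map (fun q => ((PySem.Str.split₀ q).length : Int))) := by
  rw [← PySem.Dict.foldl_insert_getD_add_one_eq_counter, List.foldl_map]
  congr 1
  funext d i
  cases h : d.get? ((PySem.Str.split₀ i).length : Int) <;>
    simp [PySem.Dict.getD, h]

-- ===== VERDICT (by name: the statement is the Claim_ definition above) =====
theorem search_spec : Claim_equal_search := by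
  intro qs _
  unfold Spec_search search search_alt
  simp only [pv_rowA_eq_counter, PySem.Dict.items_counter, List.foldl_map]
  rw [pv_tally_items ((qs.length : Int))
        (qs.map (fun q => ((PySem.Str.split₀ q).length : Int))).length
        (qs.map (fun q => ((PySem.Str.split₀ q).length : Int))) (le_refl _)]
  rw [PySem.Dict.items_foldl_insert_fresh
        (PySem.Set.ofList (qs.map (fun q => ((PySem.Str.split₀ q).length : Int))))
        (fun a : Int => a)
        (fun a : Int => pvRoundPct (((qs.map (fun q => ((PySem.Str.split₀ q).length : Int))).count a : Nat) : Int) ((qs.length : Int)))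
        (PySem.Dict.empty : PySem.Dict Int Int)
        (by intro a _; exact PySem.Dict.contains_empty _)
        (by simp)]
  rw [show (PySem.Dict.empty : PySem.Dict Int Int).items = [] from rfl]
  simp
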